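-- pv_equiv track=rewrite | github.com/ajslater/comicbox | comicbox/box/merge.py | _create_pages_map
-- ===== SOURCE A (Python) =====
-- def _create_pages_map(pages):
--     """Create page map from a page list."""
--     pages_map = {}
--     max_pages_index = -1
--     for page in pages:
--         index = page.get("index", 0)
--         pages_map[index] = page
--         max_pages_index = max(max_pages_index, index)
--     return pages_map, max_pages_index
-- ===== SOURCE B (Python) =====
-- def _create_pages_map(pages):
--     """Create page map from a page list."""
--     indexes = [page.get("index", 0) for page in pages]
--     pages_map = dict(zip(indexes, pages))
--     return pages_map, sorted([-1, *indexes])[-1]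
-- ===== Notes on version B (the rewrite author's own statement) =====
-- stated objective: alternative
-- what changed: Replaces the fused build-and-track loop by staged passes: extract the index list, build the map with dict(zip(...)), and obtain the maximum as the last element of the sorted index list seeded with the -1 sentinel.
import Mathlib
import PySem

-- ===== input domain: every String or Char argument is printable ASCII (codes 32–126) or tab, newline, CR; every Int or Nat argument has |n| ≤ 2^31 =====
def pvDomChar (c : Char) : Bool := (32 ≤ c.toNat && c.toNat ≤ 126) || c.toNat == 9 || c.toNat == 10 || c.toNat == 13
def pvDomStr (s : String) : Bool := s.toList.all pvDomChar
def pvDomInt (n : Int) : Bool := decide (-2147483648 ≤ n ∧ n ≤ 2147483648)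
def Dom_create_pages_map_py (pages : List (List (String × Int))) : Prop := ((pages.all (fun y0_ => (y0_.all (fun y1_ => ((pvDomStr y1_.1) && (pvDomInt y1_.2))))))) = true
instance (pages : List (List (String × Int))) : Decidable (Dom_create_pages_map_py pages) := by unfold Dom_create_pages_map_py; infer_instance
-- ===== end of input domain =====

-- B replaces the fused build-and-track loop by staged passes: index list, dict(zip), and a sort whose last element is the maximum (alternative decomposition, not faster).

-- ===== PORT A =====
-- page.get("index", 0)
def pvPageIndex (page : List (String × Int)) : Int :=
  (PySem.Dict.mk page).getD "index" 0

def create_pages_map_py (pages : List (List (String × Int))) : (List (Int × List (String × Int))) × Int :=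
  let st := pages.foldl
    (fun (st : PySem.Dict Int (List (String × Int)) × Int) page =>
      let index := pvPageIndex page
      (st.1.insert index page, max st.2 index))
    (PySem.Dict.empty, -1)
  (st.1.items, st.2)

-- ===== PORT B =====
def create_pages_map_py_alt (pages : List (List (String × Int))) : (List (Int × List (String × Int))) × Int :=
  let indexes := pages.map pvPageIndex
  let pages_map := PySem.Dict.ofList (indexes.zip pages)
  -- sorted([-1, *indexes])[-1] : the sorted list is nonempty, so the [-1] lookup always hits
  (pages_map.items,
    (PySem.List.pyGet? (PySem.List.sorted ((-1) :: indexes) (fun x => x) false) (-1)).getD (-1))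

-- ===== PRECONDITION & SPEC =====
def Spec_create_pages_map_py (pages : List (List (String × Int))) (out : (List (Int × List (String × Int))) × Int) : Prop := out = create_pages_map_py_alt pages
instance (pages : List (List (String × Int))) (out : (List (Int × List (String × Int))) × Int) : Decidable (Spec_create_pages_map_py pages out) := by unfold Spec_create_pages_map_py; infer_instance

-- ===== CLAIM (what is proved, stated in full; the proofs are below) =====
def Claim_equal_create_pages_map_py : Prop := ∀ (pages : List (List (String × Int))), Dom_create_pages_map_py pages → Spec_create_pages_map_py pages (create_pages_map_py pages)

-- ===== LEMMAS AND PROOFS =====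

-- The dict component of A's fused fold equals a dict-only fold.
theorem pv_fst_fold (pages : List (List (String × Int)))
    (d : PySem.Dict Int (List (String × Int))) (m : Int) :
    (pages.foldl
      (fun (st : PySem.Dict Int (List (String × Int)) × Int) page =>
        (st.1.insert (pvPageIndex page) page, max st.2 (pvPageIndex page)))
      (d, m)).1
    = pages.foldl
        (fun (d : PySem.Dict Int (List (String × Int))) page => d.insert (pvPageIndex page) page)
        d := by
  induction pages generalizing d m with
  | nil => rfl
  | cons p t ih => exact ih _ _

-- The max component of A's fused fold is the running max of the page indexes.
theorem pv_snd_fold (pages : List (List (String × Int)))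
    (d : PySem.Dict Int (List (String × Int))) (m : Int) :
    (pages.foldl
      (fun (st : PySem.Dict Int (List (String × Int)) × Int) page =>
        (st.1.insert (pvPageIndex page) page, max st.2 (pvPageIndex page)))
      (d, m)).2
    = (pages.map pvPageIndex).foldl max m := by
  induction pages generalizing d m with
  | nil => rfl
  | cons p t ih => simp [List.foldl, ih]

-- dict(ps) is the insert fold over the pair list.
theorem pv_ofList_eq_foldl {κ ν : Type} [BEq κ] (ps : List (κ × ν)) :
    PySem.Dict.ofList ps = ps.foldl (fun d p => d.insert p.1 p.2) PySem.Dict.empty := rfl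

-- zip of a mapped copy with the original list.
theorem pv_zip_map {α β : Type} (l : List α) {f : α → β} :
    (l.map f).zip l = l.map (fun p => (f p, p)) := by
  induction l with
  | nil => rfl
  | cons a t ih => simp [ih]

-- xs[-1] is the last element of a nonempty list.
theorem pv_pyGet_neg_one {α : Type} (xs : List α) (h : xs ≠ []) :
    PySem.List.pyGet? xs (-1) = some (xs.getLast h) := by
  have hl : 1 ≤ xs.length := List.length_pos_iff.mpr h
  simp [PySem.List.pyGet?, PySem.List.pyIdx?, hl]
  rw [List.getLast_eq_getElem]
  exact List.getElem?_eq_getElem (by omega)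

-- The last element of sorted((-1)::l) is the running max of l started at -1.
theorem pv_sorted_last_eq_foldl_max (l : List Int) :
    (PySem.List.pyGet? (PySem.List.sorted ((-1) :: l) (fun x => x) false) (-1)).getD (-1)
    = l.foldl max (-1) := by
  set s := PySem.List.sorted ((-1) :: l) (fun x => x) false with hs
  have hlen : s.length = l.length + 1 := by
    rw [hs, PySem.List.length_sorted]; rfl
  have hne : s ≠ [] := by
    intro h; rw [h] at hlen; simp at hlen
  rw [pv_pyGet_neg_one s hne]
  simp only [Option.getD_some]
  have hmem_s : ∀ x : Int, x ∈ s ↔ x ∈ (-1 : Int) :: l := by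
    intro x; rw [hs]; exact PySem.List.mem_sorted ((-1) :: l) (fun x => x) false x
  apply le_antisymm
  · -- last element is some member of (-1)::l, hence ≤ running max
    have hmem : s.getLast hne ∈ (-1 : Int) :: l := (hmem_s _).mp (List.getLast_mem hne)
    rcases List.mem_cons.mp hmem with h1 | h1
    · rw [h1]; exact (PySem.List.le_foldl_max l (-1)).1
    · exact (PySem.List.le_foldl_max l (-1)).2 _ h1
  · -- running max is a member of s, and every member is ≤ the last element
    have hM : l.foldl max (-1) ∈ (-1 : Int) :: l := by
      rcases PySem.List.foldl_max_mem l (-1) with h1 | h1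
      · rw [h1]; exact List.mem_cons_self
      · exact List.mem_cons_of_mem _ h1
    have hMs : l.foldl max (-1) ∈ s := (hmem_s _).mpr hM
    rcases List.mem_iff_getElem.mp hMs with ⟨p, hp, hval⟩
    rw [List.getLast_eq_getElem, ← hval]
    exact PySem.List.sorted_id_getElem_mono ((-1) :: l)
      (p := p) (q := s.length - 1) (by omega) (by rw [← hs]; omega)

-- ===== VERDICT (by name: the statement is the Claim_ definition above) =====
theorem create_pages_map_py_spec : Claim_equal_create_pages_map_py := by
  intro pages _
  unfold Spec_create_pages_map_py create_pages_map_py create_pages_map_py_alt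
  simp only
  refine Prod.ext ?_ ?_
  · -- dict(zip(indexes, pages)) is the same insert fold
    have hzip : (pages.map pvPageIndex).zip pages
        = pages.map (fun p => (pvPageIndex p, p)) := pv_zip_map pages
    rw [pv_fst_fold, hzip, pv_ofList_eq_foldl, List.foldl_map]
  · rw [pv_snd_fold, pv_sorted_last_eq_foldl_max]
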